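-- pv_equiv track=rewrite | github.com/rhit-hurtigna/plc-tests | grader.py | parse_scheme_list
-- ===== SOURCE A (Python) =====
-- def parse_scheme_list(scheme_list):
--     scheme_list = scheme_list[1:-1]
--     list_of_items = []
--     current_item = ""
--     parens_depth = 0
--     for char in scheme_list:
--         if parens_depth == 0:
--             if char == ' ':
--                 list_of_items.append(current_item)
--                 current_item = ""
--             else:
--                 current_item += char
--             if char == '(':
--                 parens_depth += 1
--         else:
--             current_item += char
--             if char == '(':
--                 parens_depth += 1
--             elif char == ')':
--                 parens_depth -= 1
--     list_of_items.append(current_item)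
--     return list_of_items
-- ===== SOURCE B (Python) =====
-- def parse_scheme_list(scheme_list):
--     s = scheme_list[1:-1]
--     marked = []
--     depth = 0
--     for ch in s:
--         marked.append('\x00' if depth == 0 and ch == ' ' else ch)
--         if ch == '(':
--             depth += 1
--         elif ch == ')' and depth > 0:
--             depth -= 1
--     return ''.join(marked).split('\x00')
-- ===== Notes on version B (the rewrite author's own statement) =====
-- stated objective: simpler
-- what changed: Instead of accumulating items and a current token by hand, B does one pass that only tracks depth and replaces each depth-0 space with a sentinel char, then lets str.split produce the token list.
import Mathlib
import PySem

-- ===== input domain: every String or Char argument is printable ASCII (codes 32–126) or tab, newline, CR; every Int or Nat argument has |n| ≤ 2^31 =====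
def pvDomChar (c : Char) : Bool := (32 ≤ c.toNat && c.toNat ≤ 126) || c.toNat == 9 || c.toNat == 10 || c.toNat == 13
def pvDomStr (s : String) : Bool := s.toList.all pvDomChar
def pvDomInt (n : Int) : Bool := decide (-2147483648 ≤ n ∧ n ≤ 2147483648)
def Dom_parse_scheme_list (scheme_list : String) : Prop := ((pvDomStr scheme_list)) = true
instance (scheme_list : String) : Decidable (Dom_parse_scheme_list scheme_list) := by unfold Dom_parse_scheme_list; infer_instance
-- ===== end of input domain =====

-- B marks each depth-0 space with a sentinel char in one pass and lets str.split produce the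
-- tokens, instead of A's manual accumulation of list_of_items/current_item; objective: simpler.

-- ===== PORT A =====
-- A's loop body: state (list_of_items, current_item, parens_depth), branches in A's order.
def stepA (st : List String × String × Int) (ch : Char) : List String × String × Int :=
  let items := st.1
  let cur := st.2.1
  let d := st.2.2
  if d == 0 then
    let p := if ch == ' ' then (items ++ [cur], "") else (items, cur.push ch)
    (p.1, p.2, if ch == '(' then d + 1 else d)
  else
    (items, cur.push ch, if ch == '(' then d + 1 else if ch == ')' then d - 1 else d)

-- literal transliteration of A: fold the loop body over the chars of scheme_list[1:-1],
-- then append the final current_item.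
def parse_scheme_list (scheme_list : String) : List String :=
  let s := PySem.Str.slice scheme_list (some 1) (some (-1))
  let st := s.toList.foldl stepA ([], "", 0)
  st.1 ++ [st.2.1]

-- ===== PORT B =====
-- Source B's loop body: state (marked, depth); append sentinel for a depth-0 space, else the char.
def stepB (st : List Char × Int) (ch : Char) : List Char × Int :=
  (st.1 ++ [if st.2 == 0 && ch == ' ' then '\x00' else ch],
   if ch == '(' then st.2 + 1 else if ch == ')' && st.2 > 0 then st.2 - 1 else st.2)

-- literal transliteration of Source B: one marking pass, then ''.join(marked).split('\x00').
def parse_scheme_list_alt (scheme_list : String) : List String :=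
  let s := PySem.Str.slice scheme_list (some 1) (some (-1))
  let st := s.toList.foldl stepB ([], 0)
  (PySem.Str.split? (String.ofList st.1) "\x00").getD []

-- ===== PRECONDITION & SPEC =====
def Spec_parse_scheme_list (scheme_list : String) (out : List String) : Prop := out = parse_scheme_list_alt scheme_list
instance (scheme_list : String) (out : List String) : Decidable (Spec_parse_scheme_list scheme_list out) := by unfold Spec_parse_scheme_list; infer_instance

-- ===== CLAIM (what is proved, stated in full; the proofs are below) =====
def Claim_equal_parse_scheme_list : Prop := ∀ (scheme_list : String), Dom_parse_scheme_list scheme_list → Spec_parse_scheme_list scheme_list (parse_scheme_list scheme_list)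

-- ===== LEMMAS AND PROOFS =====

-- prepend cs into the head token (used to characterise both programs)
def consH (cs : List Char) : List (List Char) → List (List Char)
  | [] => [cs]
  | t :: ts => (cs ++ t) :: ts

-- split a char list on single-char separator k, keeping empty tokens (Python str.split semantics)
def splitChar (k : Char) : List Char → List (List Char)
  | [] => [[]]
  | c :: r => if c == k then [] :: splitChar k r else consH [c] (splitChar k r)

-- the depth update both programs perform (A reaches the ')'-decrement only when d ≠ 0)
def stepD (d : Int) (c : Char) : Int :=
  if c == '(' then d + 1 else if c == ')' && d > 0 then d - 1 else d

-- the marked string B builds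
def mark : List Char → Int → List Char
  | [], _ => []
  | c :: r, d => (if d == 0 && c == ' ' then '\x00' else c) :: mark r (stepD d c)

theorem stepD_nonneg (d : Int) (c : Char) (hd : 0 ≤ d) : 0 ≤ stepD d c := by
  unfold stepD
  split
  · omega
  · split
    · rename_i h
      have := of_decide_eq_true (Bool.and_elim_right h)
      omega
    · exact hd

theorem splitChar_ne_nil (k : Char) (l : List Char) : splitChar k l ≠ [] := by
  cases l with
  | nil => simp [splitChar]
  | cons c r =>
    simp only [splitChar]
    split
    · simp
    · cases h : splitChar k r <;> simp [consH]

theorem consH_nil (X : List (List Char)) (h : X ≠ []) : consH [] X = X := by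
  cases X with
  | nil => exact absurd rfl h
  | cons t ts => simp [consH]

theorem consH_consH (a : List Char) (c : Char) (X : List (List Char)) :
    consH a (consH [c] X) = consH (a ++ [c]) X := by
  cases X <;> simp [consH]

-- B's fold builds exactly m0 ++ mark l d as its first component
theorem b_fold (l : List Char) (m0 : List Char) (d : Int) :
    (l.foldl stepB (m0, d)).1 = m0 ++ mark l d := by
  induction l generalizing m0 d with
  | nil => simp [mark]
  | cons c r ih =>
    rw [List.foldl_cons]
    show (List.foldl stepB (m0 ++ [_], _) r).1 = _
    rw [ih]
    simp [mark, stepD]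

-- fuel-exact characterisation of PySem's splitOn.go for a single-char separator
theorem splitOn_go_spec (k : Char) (l cur : List Char) (acc : List (List Char)) :
    PySem.Chars.splitOn.go [k] (l.length + 1) l cur acc
      = acc.reverse ++ consH cur.reverse (splitChar k l) := by
  induction l generalizing cur acc with
  | nil => simp [PySem.Chars.splitOn.go, splitChar, consH]
  | cons c r ih =>
    show PySem.Chars.splitOn.go [k] (r.length + 1 + 1) (c :: r) cur acc = _
    rw [PySem.Chars.splitOn.go]
    by_cases h : c = k
    · subst h
      rw [if_pos (by simp [List.isPrefixOf_iff_prefix, List.cons_prefix_cons])]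
      simp only [List.length_cons, List.length_nil, List.drop_succ_cons, List.drop_zero]
      rw [ih]
      have h1 : splitChar c (c :: r) = [] :: splitChar c r := by
        simp only [splitChar]
        rw [if_pos (by simp)]
      rw [h1]
      cases hsc : splitChar c r with
      | nil => exact absurd hsc (splitChar_ne_nil _ _)
      | cons t ts => simp [consH]
    · rw [if_neg (by
        simp only [List.isPrefixOf_iff_prefix, List.cons_prefix_cons]
        intro hpre
        exact h hpre.1.symm)]
      rw [ih]
      have hsc : splitChar k (c :: r) = consH [c] (splitChar k r) := by
        simp only [splitChar]
        rw [if_neg (by simpa using h)]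
      rw [hsc, consH_consH, ← List.reverse_cons]
  termination_by l.length

theorem splitOn_eq_splitChar (k : Char) (l : List Char) :
    PySem.Chars.splitOn l [k] = splitChar k l := by
  show PySem.Chars.splitOn.go [k] (l.length + 1) l [] [] = _
  rw [splitOn_go_spec]
  simp [consH_nil _ (splitChar_ne_nil k l)]

-- A's fold, finished with list_of_items ++ [current_item], equals the marked-and-split tokens
theorem a_fold (l : List Char) (items : List String) (cur : String) (d : Int)
    (hd : 0 ≤ d) (hl : '\x00' ∉ l) :
    (l.foldl stepA (items, cur, d)).1 ++ [(l.foldl stepA (items, cur, d)).2.1]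
      = items ++ (consH cur.toList (splitChar '\x00' (mark l d))).map String.ofList := by
  induction l generalizing items cur d with
  | nil =>
    simp [mark, splitChar, consH, String.ofList_toList]
  | cons c r ih =>
    have hc : c ≠ '\x00' := by intro h; exact hl (h ▸ List.mem_cons_self)
    have hr : '\x00' ∉ r := fun h => hl (List.mem_cons_of_mem _ h)
    rw [List.foldl_cons]
    by_cases h0 : d = 0
    · subst h0
      by_cases hsp : c = ' '
      · subst hsp
        have hstep : stepA (items, cur, 0) ' ' = (items ++ [cur], "", 0) := by
          simp [stepA]
        rw [hstep, ih _ _ _ le_rfl hr]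
        have hm : mark (' ' :: r) 0 = '\x00' :: mark r 0 := by
          have : stepD 0 ' ' = 0 := by simp [stepD]
          simp [mark, this]
        rw [hm]
        simp only [splitChar, beq_self_eq_true, if_pos]
        have h0 : ("" : String).toList = ([] : List Char) := rfl
        rw [h0, consH_nil _ (splitChar_ne_nil _ _)]
        cases hsc : splitChar '\x00' (mark r 0) with
        | nil => exact absurd hsc (splitChar_ne_nil _ _)
        | cons t ts => simp [consH, String.ofList_toList]
      · have hstep : stepA (items, cur, 0) c = (items, cur.push c, stepD 0 c) := by
          rcases Bool.eq_false_or_eq_true (c == '(') with hp | hp <;>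
            simp [stepA, stepD, hsp, hp]
        rw [hstep, ih _ _ _ (stepD_nonneg 0 c le_rfl) hr]
        have hm : mark (c :: r) 0 = c :: mark r (stepD 0 c) := by
          simp [mark, hsp]
        rw [hm]
        simp only [splitChar, beq_iff_eq, if_neg hc]
        rw [consH_consH]
        simp [String.toList_push]
    · have hdeq : (d == 0) = false := by simpa using h0
      have hdpos : (0:Int) < d := lt_of_le_of_ne hd (Ne.symm h0)
      have hstep : stepA (items, cur, d) c = (items, cur.push c, stepD d c) := by
        rcases Bool.eq_false_or_eq_true (c == '(') with hp | hp
        · simp [stepA, stepD, hdeq, hp]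
        · simp only [stepA, stepD, hdeq, hp]
          simp only [Bool.false_eq_true, if_false]
          split_ifs <;> simp_all
      rw [hstep, ih _ _ _ (stepD_nonneg d c hd) hr]
      have hm : mark (c :: r) d = c :: mark r (stepD d c) := by
        simp only [mark, hdeq, Bool.false_and, Bool.false_eq_true, if_false]
      rw [hm]
      simp only [splitChar, beq_iff_eq, if_neg hc]
      rw [consH_consH]
      simp [String.toList_push]

theorem mem_slice_of_mem {α : Type} (xs : List α) (a b : Option Int) (c : α)
    (h : c ∈ PySem.List.slice xs a b) : c ∈ xs := by
  unfold PySem.List.slice at h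
  split at h <;>
    first
      | exact List.mem_of_mem_drop (List.mem_of_mem_take h)
      | exact List.mem_of_mem_take h
      | exact List.mem_of_mem_drop h
      | exact h

-- ===== VERDICT (by name: the statement is the Claim_ definition above) =====
theorem parse_scheme_list_spec : Claim_equal_parse_scheme_list := by
  intro s hdom
  simp only [Spec_parse_scheme_list, parse_scheme_list, parse_scheme_list_alt]
  have hnul : '\x00' ∉ (PySem.Str.slice s (some 1) (some (-1))).toList := by
    intro hmem
    rw [PySem.Str.toList_slice] at hmem
    have hin : '\x00' ∈ s.toList := mem_slice_of_mem _ _ _ _ hmem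
    simp only [Dom_parse_scheme_list, pvDomStr, List.all_eq_true] at hdom
    have := hdom _ hin
    simp [pvDomChar] at this
  rw [a_fold _ [] "" 0 le_rfl hnul, b_fold]
  rw [PySem.Str.split?]
  have hsep : ("\x00" : String).toList = ['\x00'] := rfl
  rw [hsep]
  have hq : PySem.Chars.split? (String.ofList ([] ++ mark (PySem.Str.slice s (some 1) (some (-1))).toList 0)).toList ['\x00']
      = some (PySem.Chars.splitOn (mark (PySem.Str.slice s (some 1) (some (-1))).toList 0) ['\x00']) := by
    rw [PySem.Chars.split?]
    simp [String.toList_ofList]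
  rw [hq]
  simp only [Option.map_some, Option.getD_some]
  rw [splitOn_eq_splitChar]
  have hempty : ("" : String).toList = [] := rfl
  rw [hempty, consH_nil _ (splitChar_ne_nil _ _)]
  simp
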